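-- pv_equiv track=rewrite | github.com/StrayDragon/OJ-Solutions | PTA/DS_2019_Spring/exam-05-9-TLE.py | has_prefix_code
-- ===== SOURCE A (Python) =====
-- from typing import List
--
-- def has_prefix_code(codes: List[str], n: int) -> bool:
--
--     def is_prefix(s1: str, s2: str) -> bool:
--         i1, i2 = 0, 0
--         while i1 < len(s1) and i2 < len(s2) and s1[i1] == s2[i2]:
--             i1 += 1
--             i2 += 1
--         if i1 == len(s1) or i2 == len(s2):
--             return True
--         return False
--
--     for i in range(n):
--         for j in range(i+1, n):
--             if is_prefix(codes[i], codes[j]):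
--                 return True
--     return False
-- ===== SOURCE B (Python) =====
-- def has_prefix_code(codes, n):
--     s = sorted(codes[i] for i in range(n))
--     return any(b.startswith(a) for a, b in zip(s, s[1:]))
-- ===== Notes on version B (the rewrite author's own statement) =====
-- stated objective: alternative
-- what changed: A compares every pair of the first n codes with a hand-written char-by-char prefix walk; B sorts the first n codes lexicographically once and checks only adjacent pairs with startswith (A's early exit makes it as fast in practice, so no speed is claimed).
-- outside the precondition, e.g. on has_prefix_code(['a', 'ab'], 5): A returns True, B raises IndexError
import Mathlib
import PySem

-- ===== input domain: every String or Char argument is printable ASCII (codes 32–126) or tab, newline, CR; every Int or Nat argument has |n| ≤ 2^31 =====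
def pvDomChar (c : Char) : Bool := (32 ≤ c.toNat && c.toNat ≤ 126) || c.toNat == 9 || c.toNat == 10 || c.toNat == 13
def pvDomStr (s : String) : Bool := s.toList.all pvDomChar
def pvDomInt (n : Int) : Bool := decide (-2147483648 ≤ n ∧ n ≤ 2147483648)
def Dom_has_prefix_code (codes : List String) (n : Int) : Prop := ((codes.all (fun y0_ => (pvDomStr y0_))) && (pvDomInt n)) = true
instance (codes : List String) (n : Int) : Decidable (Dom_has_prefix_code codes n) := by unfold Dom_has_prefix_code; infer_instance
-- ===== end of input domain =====

-- B replaces A's all-pairs char-by-char prefix walk by sorting the first n codes once and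
-- checking only lexicographically adjacent pairs with startswith (objective: alternative algorithm).

-- ===== PORT A =====
-- the while-loop of A's inner helper is_prefix: advance while chars match; true iff either side is exhausted
def isPrefixA : List Char → List Char → Bool
  | [], _ => true
  | _ :: _, [] => true
  | c1 :: t1, c2 :: t2 => if c1 = c2 then isPrefixA t1 t2 else false

def has_prefix_code (codes : List String) (n : Int) : Bool :=
  (PySem.List.pyRange 0 n 1).any (fun i =>
    (PySem.List.pyRange (i + 1) n 1).any (fun j =>
      isPrefixA (PySem.List.pyGetD codes i "").toList (PySem.List.pyGetD codes j "").toList))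

-- ===== PORT B =====
def has_prefix_code_alt (codes : List String) (n : Int) : Bool :=
  let s := PySem.List.sorted ((PySem.List.pyRange 0 n 1).map (fun i => PySem.List.pyGetD codes i "")) (fun x => x) false
  (s.zip (PySem.List.slice s (some 1) none)).any (fun p => PySem.Str.startswith p.2 p.1)

-- ===== PRECONDITION & SPEC =====
-- Pre_ excludes n > len(codes): there A raises IndexError unless an early prefix pair
-- short-circuits the scan first, and B raises IndexError.
def Pre_has_prefix_code (codes : List String) (n : Int) : Prop := n ≤ codes.length
instance (codes : List String) (n : Int) : Decidable (Pre_has_prefix_code codes n) := by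
  unfold Pre_has_prefix_code; infer_instance

def pvWitness_has_prefix_code : List String × Int := (["ab", "cd"], 2)

def Spec_has_prefix_code (codes : List String) (n : Int) (out : Bool) : Prop := out = has_prefix_code_alt codes n
instance (codes : List String) (n : Int) (out : Bool) : Decidable (Spec_has_prefix_code codes n out) := by
  unfold Spec_has_prefix_code; infer_instance

-- ===== CLAIM (what is proved, stated in full; the proofs are below) =====
def Claim_equal_has_prefix_code : Prop := ∀ (codes : List String) (n : Int), Dom_has_prefix_code codes n → Pre_has_prefix_code codes n → Spec_has_prefix_code codes n (has_prefix_code codes n)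

-- ===== LEMMAS AND PROOFS =====

-- the symmetric "one is a prefix of the other" relation A's helper decides
def pvR (x y : String) : Prop := x.toList <+: y.toList ∨ y.toList <+: x.toList

lemma pvR_symm {x y : String} (h : pvR x y) : pvR y x := h.symm

lemma notR_symm : Symmetric (fun a b : String => ¬ pvR a b) :=
  fun _ _ h hr => h (pvR_symm hr)

lemma getB (l : List String) (i : Nat) (h : i < l.length) : l[i]! = l[i] :=
  getElem!_pos l i h

lemma isPrefixA_iff : ∀ a b : List Char, isPrefixA a b = true ↔ (a <+: b ∨ b <+: a) := by
  intro a
  induction a with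
  | nil => intro b; simp [isPrefixA]
  | cons c1 t1 ih =>
    intro b
    cases b with
    | nil => simp [isPrefixA]
    | cons c2 t2 =>
      by_cases h : c1 = c2
      · subst h; simp [isPrefixA, ih, List.cons_prefix_cons]
      · simp [isPrefixA, h, List.cons_prefix_cons, Ne.symm h]

-- a proper prefix is lexicographically smaller
lemma lex_of_prefix_ne : ∀ u v : List Char, u <+: v → u ≠ v → List.Lex (· < ·) u v := by
  intro u
  induction u with
  | nil =>
    intro v _ hne
    cases v with
    | nil => exact absurd rfl hne
    | cons b bs => exact List.Lex.nil
  | cons a as ih =>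
    intro v hp hne
    cases v with
    | nil => simp at hp
    | cons b bs =>
      rw [List.cons_prefix_cons] at hp
      obtain ⟨rfl, hp'⟩ := hp
      exact List.Lex.cons (ih bs hp' (fun h => hne (by rw [h])))

lemma le_of_prefix {u v : String} (h : u.toList <+: v.toList) : u ≤ v := by
  rcases eq_or_ne u.toList v.toList with he | hne
  · exact le_of_eq (String.toList_inj.mp he)
  · exact le_of_lt (String.lt_iff_toList_lt.mpr (lex_of_prefix_ne _ _ h hne))

-- between two lex-ordered strings, a common prefix of the larger is a prefix of the middle one
lemma prefix_of_between : ∀ u v w : List Char,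
    (List.Lex (· < ·) u v ∨ u = v) → (List.Lex (· < ·) v w ∨ v = w) → u <+: w → u <+: v := by
  intro u
  induction u with
  | nil => intro v w _ _ _; exact List.nil_prefix
  | cons a u' ih =>
    intro v w huv hvw hp
    cases w with
    | nil => simp at hp
    | cons c w' =>
      rw [List.cons_prefix_cons] at hp
      obtain ⟨rfl, hp'⟩ := hp
      rcases huv with huv | rfl
      · cases v with
        | nil => cases huv
        | cons b v' =>
          rcases hvw with hvw | hveq
          · cases huv with
            | rel h1 =>
              cases hvw with
              | rel h2 => exact absurd (h1.trans h2) (lt_irrefl a)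
              | cons h2 => exact absurd h1 (lt_irrefl a)
            | cons h1 =>
              cases hvw with
              | rel h2 => exact absurd h2 (lt_irrefl a)
              | cons h2 => exact List.cons_prefix_cons.mpr ⟨rfl, ih v' w' (Or.inl h1) (Or.inl h2) hp'⟩
          · rw [hveq]; exact List.cons_prefix_cons.mpr ⟨rfl, hp'⟩
      · exact List.prefix_refl _

lemma prefix_of_between_str {u v w : String} (huv : u ≤ v) (hvw : v ≤ w)
    (h : u.toList <+: w.toList) : u.toList <+: v.toList := by
  have h1 := String.le_iff_toList_le.mp huv
  have h2 := String.le_iff_toList_le.mp hvw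
  refine prefix_of_between u.toList v.toList w.toList ?_ ?_ h
  · rcases lt_or_eq_of_le h1 with hlt | heq
    · exact Or.inl hlt
    · exact Or.inr heq
  · rcases lt_or_eq_of_le h2 with hlt | heq
    · exact Or.inl hlt
    · exact Or.inr heq

-- a prefix-related pair exists iff the "no prefix relation" pairwise property fails
lemma pair_iff_not_pairwise (l : List String) :
    (∃ p q : Nat, p < q ∧ q < l.length ∧ pvR l[p]! l[q]!) ↔
      ¬ l.Pairwise (fun a b => ¬ pvR a b) := by
  rw [List.pairwise_iff_getElem]
  push Not
  constructor
  · rintro ⟨p, q, hpq, hq, hR⟩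
    have hp : p < l.length := by omega
    refine ⟨p, q, hp, hq, hpq, ?_⟩
    rwa [getB l p hp, getB l q hq] at hR
  · rintro ⟨p, q, hp, hq, hpq, hR⟩
    refine ⟨p, q, hpq, hq, ?_⟩
    rwa [getB l p hp, getB l q hq]

-- A = true ↔ some earlier/later pair among the first n codes is prefix-related
lemma A_iff (codes : List String) (n : Int) (h0 : 0 ≤ n) (hn : n ≤ codes.length) :
    has_prefix_code codes n = true ↔
      ∃ p q : Nat, p < q ∧ q < (codes.take n.toNat).length ∧
        pvR (codes.take n.toNat)[p]! (codes.take n.toNat)[q]! := by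
  have hlen : (codes.take n.toNat).length = n.toNat := by
    simp [List.length_take]; omega
  unfold has_prefix_code
  simp only [List.any_eq_true, PySem.List.mem_pyRange_one]
  constructor
  · rintro ⟨i, ⟨hi0, hin⟩, j, ⟨hij, hjn⟩, hP⟩
    have hilen : i.toNat < codes.length := by omega
    have hjlen : j.toNat < codes.length := by omega
    have e1 : PySem.List.pyGetD codes i "" = codes[i.toNat] := by
      apply PySem.List.pyGetD_eq_getElem <;> omega
    have e2 : PySem.List.pyGetD codes j "" = codes[j.toNat] := by
      apply PySem.List.pyGetD_eq_getElem <;> omega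
    rw [e1, e2, isPrefixA_iff] at hP
    have hqlt : j.toNat < (codes.take n.toNat).length := by omega
    have hplt : i.toNat < (codes.take n.toNat).length := by omega
    refine ⟨i.toNat, j.toNat, by omega, hqlt, ?_⟩
    rw [getB _ _ hplt, getB _ _ hqlt, List.getElem_take, List.getElem_take]
    exact hP
  · rintro ⟨p, q, hpq, hq, hR⟩
    have hp : p < (codes.take n.toNat).length := by omega
    have hqn : q < n.toNat := by omega
    have hqc : q < codes.length := by omega
    have hpc : p < codes.length := by omega
    refine ⟨(p : Int), ⟨by omega, by omega⟩, (q : Int), ⟨by omega, by omega⟩, ?_⟩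
    have e1 : PySem.List.pyGetD codes (p : Int) "" = codes[((p : Int)).toNat]'(by omega) := by
      apply PySem.List.pyGetD_eq_getElem <;> omega
    have e2 : PySem.List.pyGetD codes (q : Int) "" = codes[((q : Int)).toNat]'(by omega) := by
      apply PySem.List.pyGetD_eq_getElem <;> omega
    simp only [Int.toNat_natCast] at e1 e2
    rw [e1, e2, isPrefixA_iff]
    rw [getB _ _ hp, getB _ _ hq, List.getElem_take, List.getElem_take] at hR
    exact hR

-- selecting the first n codes by index is List.take
lemma sel_eq (codes : List String) (n : Int) (hn : n ≤ codes.length) :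
    (PySem.List.pyRange 0 n 1).map (fun i => PySem.List.pyGetD codes i "") = codes.take n.toNat := by
  apply List.ext_getElem
  · simp [PySem.List.length_pyRange_one, List.length_take]; omega
  · intro i h1 h2
    simp only [List.length_map, PySem.List.length_pyRange_one] at h1
    simp only [List.getElem_map, PySem.List.getElem_pyRange_one, zero_add, List.getElem_take]
    have e : PySem.List.pyGetD codes (i : Int) "" = codes[((i : Int)).toNat]'(by omega) := by
      apply PySem.List.pyGetD_eq_getElem <;> omega
    simp only [Int.toNat_natCast] at e
    exact e

-- B = true ↔ some adjacent pair of the sorted list is prefix-related (left into right)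
lemma B_iff (codes : List String) (n : Int) (h0 : 0 ≤ n) (hn : n ≤ codes.length) :
    has_prefix_code_alt codes n = true ↔
      ∃ k : Nat, k + 1 < (PySem.List.sorted (codes.take n.toNat) (fun x => x) false).length ∧
        (PySem.List.sorted (codes.take n.toNat) (fun x => x) false)[k]!.toList <+:
        (PySem.List.sorted (codes.take n.toNat) (fun x => x) false)[k+1]!.toList := by
  unfold has_prefix_code_alt
  simp only [sel_eq codes n hn]
  set s := PySem.List.sorted (codes.take n.toNat) (fun x => x) false with hs
  have hdrop : PySem.List.slice s (some 1) none = s.drop 1 := by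
    have h := PySem.List.slice_from s (a := 1) (by norm_num)
    simpa using h
  rw [hdrop]
  simp only [List.any_eq_true]
  constructor
  · rintro ⟨⟨x, y⟩, hmem, hsw⟩
    obtain ⟨k, hk, he⟩ := List.mem_iff_getElem.mp hmem
    have hk1 : k + 1 < s.length := by
      simp only [List.length_zip, List.length_drop] at hk; omega
    rw [List.getElem_zip] at he
    have hx : x = s[k]'(by omega) := by
      have := congrArg Prod.fst he; simpa using this.symm
    have hy : y = s[k+1]'hk1 := by
      have h2 := congrArg Prod.snd he
      simp only at h2
      rw [← h2, List.getElem_drop]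
      congr 1; omega
    refine ⟨k, hk1, ?_⟩
    rw [getB _ _ (by omega : k < s.length), getB _ _ hk1]
    rw [PySem.Str.startswith_eq] at hsw
    have := (PySem.Chars.startswith_iff _ _).mp hsw
    rwa [hx, hy] at this
  · rintro ⟨k, hk1, hpref⟩
    rw [getB _ _ (by omega : k < s.length), getB _ _ hk1] at hpref
    refine ⟨(s[k]'(by omega), s[k+1]'hk1), ?_, ?_⟩
    · refine List.mem_iff_getElem.mpr ⟨k, ?_, ?_⟩
      · simp only [List.length_zip, List.length_drop]; omega
      · rw [List.getElem_zip]
        refine Prod.ext ?_ ?_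
        · rfl
        · simp only
          rw [List.getElem_drop]
          congr 1; omega
    · simp only
      rw [PySem.Str.startswith_eq]
      exact (PySem.Chars.startswith_iff _ _).mpr hpref

-- on the sorted list, a prefix-related pair exists iff an adjacent one does
lemma adj_iff (t : List String) :
    (∃ p q : Nat, p < q ∧ q < (PySem.List.sorted t (fun x => x) false).length ∧
        pvR (PySem.List.sorted t (fun x => x) false)[p]! (PySem.List.sorted t (fun x => x) false)[q]!) ↔
      ∃ k : Nat, k + 1 < (PySem.List.sorted t (fun x => x) false).length ∧
        (PySem.List.sorted t (fun x => x) false)[k]!.toList <+: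
        (PySem.List.sorted t (fun x => x) false)[k+1]!.toList := by
  set s := PySem.List.sorted t (fun x => x) false with hs
  constructor
  · rintro ⟨p, q, hpq, hq, hR⟩
    have hp : p < s.length := by omega
    have hp1 : p + 1 < s.length := by omega
    rw [getB _ _ hp, getB _ _ hq] at hR
    have hle1 : s[p]'hp ≤ s[q]'hq :=
      PySem.List.sorted_id_getElem_mono t (by omega) hq
    have hpref : (s[p]'hp).toList <+: (s[q]'hq).toList := by
      rcases hR with h | h
      · exact h
      · have h2 : s[q] ≤ s[p] := le_of_prefix h
        have h3 : s[p]'hp = s[q]'hq := le_antisymm hle1 h2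
        rw [h3]
    have hle2 : s[p]'hp ≤ s[p+1]'hp1 :=
      PySem.List.sorted_id_getElem_mono t (by omega) hp1
    have hle3 : s[p+1]'hp1 ≤ s[q]'hq :=
      PySem.List.sorted_id_getElem_mono t (by omega) hq
    refine ⟨p, hp1, ?_⟩
    rw [getB _ _ hp, getB _ _ hp1]
    exact prefix_of_between_str hle2 hle3 hpref
  · rintro ⟨k, hk1, h⟩
    refine ⟨k, k + 1, by omega, hk1, ?_⟩
    rw [getB _ _ (by omega : k < s.length), getB _ _ hk1] at h ⊢
    exact Or.inl h

-- ===== VERDICT (by name: the statement is the Claim_ definition above) =====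
theorem has_prefix_code_spec : Claim_equal_has_prefix_code := by
  intro codes n _ hn
  unfold Spec_has_prefix_code
  by_cases h0 : 0 ≤ n
  case neg =>
    have hnil : PySem.List.pyRange 0 n 1 = [] := PySem.List.pyRange_one_eq_nil (by omega)
    unfold has_prefix_code has_prefix_code_alt
    rw [hnil]
    have hsorted : PySem.List.sorted ([] : List String) (fun x => x) false = [] := by
      rw [PySem.List.sorted_eq_nil_iff]
    simp [hsorted]
  rw [Bool.eq_iff_iff, A_iff codes n h0 hn, B_iff codes n h0 hn]
  rw [pair_iff_not_pairwise, ← adj_iff, pair_iff_not_pairwise]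
  constructor <;> intro h hp <;> apply h
  · exact (List.Perm.pairwise_iff (R := fun a b : String => ¬ pvR a b) (fun hxy => notR_symm hxy)
      (PySem.List.sorted_perm (codes.take n.toNat) (fun x => x) false)).mp hp
  · exact (List.Perm.pairwise_iff (R := fun a b : String => ¬ pvR a b) (fun hxy => notR_symm hxy)
      (PySem.List.sorted_perm (codes.take n.toNat) (fun x => x) false)).mpr hp
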